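/- GENERATED by mk_final_copies.py from the proof of the farm's unit `start_decoder.R16e` (farm:start_decoder.R16e.1: Proof.lean) as the
   re-elaboration sweep compiled it — do not edit. -/
import Asan.CheckWalk
import Vorbis.Spec.Units.start_decoder_R16e

open X86 X86.User Asan Vorbis Vorbis.Spec Vorbis.Spec.StartDecoder

set_option maxRecDepth 4000
set_option maxHeartbeats 4000000

namespace Vorbis.Spec.start_decoder_R16e

/-- **Segment R16e of `start_decoder`** (`cut324` 0x11677b … 0x11677f → `pc_R15` 0x115f97): `add r14d, 1 ; jmp 115f97`, the back edge
of loop 4158. No memory change: the point is carried with the new program counter (`SecPt.carry` over the empty footprint); the loop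
assertion for `i + 1` is `R16.toR15` (CH(i + 1) is a field of the entry assertion). `i < channels ≤ 16`: the 32-bit increment does not
wrap. -/
theorem segR16e_walk {Lay : Layout} (hLay : Lay.hi = 0x1000000) {μ : Microarch} (hμ : UserX.MicroOK μ) {u₀ : State}
    (hcode : HasCodeNat Lay u₀ Vorbis.L.start_decoder.entry Vorbis.Code.code_start_decoder.nat Vorbis.L.start_decoder.size)
    {g : Ghost} {i : Nat} {v : State} {A9 : Arena} {A : Arena × List Obj} (hb : BodyR16d u₀ g i A9 A v) :
    ReachVia Lay μ WayInv v (fun w => AtR15 u₀ g (i + 1) w) := by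
  have hpt := hb.pt
  have hfr := hpt.frame
  have hm := hpt.mid
  have he := hfr.entry
  v_entry he
  obtain ⟨hRa, hR8⟩ := hfr.r_eq
  simp only [steady, Ghost.RA] at hRa
  simp only [depth] at he_room he_stack
  have w_rip := hfr.rip
  have c_rsp := hfr.rsp
  have c_rbp := hpt.rbp
  have c_r14 := hb.r14
  have w_eq : Mem.EqOn Vorbis.L.textLo Vorbis.L.textHi u₀.mem v.mem := hfr.code
  have hdf : v.flags .df = false := (show abiInv _ from hfr.inv).1
  have hmx : v.mxcsr &&& 0x1F80 = 0x1F80 := (show abiInv _ from hfr.inv).2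
  have hsse := Vorbis.sseOK_of_abiInv hfr.inv
  u_walk hcode [hμ.vendor] until [Vorbis.L.start_decoder.cut274] span [Vorbis.L.textLo, Vorbis.L.textHi] side (v_side)
  -- 0x11677b `add r14d, 1`: i < channels ≤ 16, no wrap; 0x11677f `jmp 115f97`: the memory is that of `v`
  have hlt := hb.lt
  have hhd := hm.header.HD1
  have hi16 : i < 16 := by omega
  have hr14 : s_11677f.reg .r14 = addr (i + 1) := by
    rw [w_r14]
    show Word.ofBV (Word.part .w32 (UInt64.ofNat i) + 1#32) = UInt64.ofNat (i + 1)
    rw [cnt32_part, cnt32_succ_bv, cnt32_ofBV _ (by omega)]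
  have habi : abiInv s_11677f := by
    refine Vorbis.abiInv_of ?_ ?_
    · rw [w_flags]
      simp only [X86.User.df_setStatus]
      exact hdf
    · rw [w_mxcsr]
      exact hmx
  have hs : Mem.SameExcept [] v.mem s_11677f.mem := by
    rw [w_mem]
    exact Mem.SameExcept.refl _ _
  have hun : ShadowUntouched v.mem s_11677f.mem := by
    rw [w_mem]
    exact fun _ _ _ => rfl
  have hrsp : s_11677f.reg .rsp = addr g.R := by
    rw [w_kept.get .rsp rfl]
    exact c_rsp
  have hbits : Bits (g.Blk A) g.len s_11677f.mem g.f := by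
    rw [w_mem]
    exact hm.bits
  have hpt' : SecPt u₀ g pc_R15 9 9 10 A9 A s_11677f :=
    hpt.carry hs hun (fun x hx => absurd hx List.not_mem_nil) hbits w_rip hrsp w_eq habi (w_kept.get .rbp rfl)
  exact ReachVia.done (R16.toR15 hb w_mem hpt' hr14)

end Vorbis.Spec.start_decoder_R16e

/-- The unit `start_decoder.R16e`: `segR16e_walk` at every entry state. -/
theorem Vorbis.Spec.Worked.start_decoder_R16e_ok : Vorbis.Spec.start_decoder_R16e.Statement := by
  intro Lay hLay μ hμ u₀ hcode g i v hat
  obtain ⟨A9, A, hb⟩ := hat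
  exact Vorbis.Spec.start_decoder_R16e.segR16e_walk hLay hμ hcode hb
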